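-- pv_equiv track=rewrite | github.com/GeorgeOrewell/FragJonny | 2scrappthesky.py | shorten_text
-- ===== SOURCE A (Python) =====
-- def shorten_text(text):
--     """Kürze den Text nach dem ersten vollständigen Satz."""
--     parts = text.split('\n')
--     end_characters = [".", "!", "?"]
--     new_string = ""
--
--     for part in parts:
--         new_string += part
--         if new_string and new_string[-1] in end_characters:
--             break
--     return new_string
-- ===== SOURCE B (Python) =====
-- def shorten_text(text):
--     """Kuerze den Text nach dem ersten vollstaendigen Satz."""
--     parts = text.split('\n')
--     cut = next((i for i, p in enumerate(parts) if p and p[-1] in ".!?"), None)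
--     if cut is None:
--         return ''.join(parts)
--     return ''.join(parts[:cut + 1])
-- ===== Notes on version B (the rewrite author's own statement) =====
-- stated objective: simpler
-- what changed: Replaces A's accumulate-and-test loop (growing a string and re-inspecting its last character every iteration) with a find-the-cut-then-slice-and-join decomposition: locate the first line ending in '.', '!' or '?', then join the prefix up to it.
import Mathlib
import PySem

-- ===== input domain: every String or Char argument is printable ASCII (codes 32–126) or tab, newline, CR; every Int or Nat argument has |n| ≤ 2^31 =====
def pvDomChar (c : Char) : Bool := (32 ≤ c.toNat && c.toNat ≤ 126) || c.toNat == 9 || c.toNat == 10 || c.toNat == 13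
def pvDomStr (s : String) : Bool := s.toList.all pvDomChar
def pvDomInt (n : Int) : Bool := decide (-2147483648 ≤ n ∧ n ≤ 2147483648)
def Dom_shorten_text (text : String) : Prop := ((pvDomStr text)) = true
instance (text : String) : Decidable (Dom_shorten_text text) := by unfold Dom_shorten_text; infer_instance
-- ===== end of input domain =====

-- B replaces A's accumulate-and-test loop with a find-the-cut-then-slice-and-join decomposition (simpler).

-- ===== PORT A =====
def pvEndCharsA : List Char := ['.', '!', '?']

-- A's loop: new_string += part; break when new_string and new_string[-1] in end_characters
def pvShortenLoopA : List (List Char) → List Char → List Char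
  | [], ns => ns
  | part :: rest, ns =>
    let ns' := ns ++ part
    if ns' ≠ [] ∧ (PySem.List.pyGet? ns' (-1)).any pvEndCharsA.contains
    then ns'
    else pvShortenLoopA rest ns'

def shorten_text (text : String) : String :=
  String.ofList (pvShortenLoopA (PySem.Chars.splitOn text.toList ['\n']) [])

-- ===== PORT B =====
-- B's condition on one part: p and p[-1] in ".!?"
def pvIsEnd (p : List Char) : Bool :=
  !p.isEmpty && (PySem.List.pyGet? p (-1)).any (".!?".toList.contains ·)

def shorten_text_alt (text : String) : String :=
  let parts := PySem.Chars.splitOn text.toList ['\n']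
  match parts.findIdx? pvIsEnd with
  | none => String.ofList (PySem.Chars.join [] parts)
  | some cut => String.ofList (PySem.Chars.join [] (parts.take (cut + 1)))

-- ===== PRECONDITION & SPEC =====
def Spec_shorten_text (text : String) (out : String) : Prop := out = shorten_text_alt text
instance (text : String) (out : String) : Decidable (Spec_shorten_text text out) := by unfold Spec_shorten_text; infer_instance

-- ===== CLAIM (what is proved, stated in full; the proofs are below) =====
def Claim_equal_shorten_text : Prop := ∀ (text : String), Dom_shorten_text text → Spec_shorten_text text (shorten_text text)

-- ===== LEMMAS AND PROOFS =====

-- B's result as a function of the split parts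
def pvAltJoin (parts : List (List Char)) : List Char :=
  match parts.findIdx? pvIsEnd with
  | none => PySem.Chars.join [] parts
  | some cut => PySem.Chars.join [] (parts.take (cut + 1))

theorem join_nil_eq_flatten (l : List (List Char)) :
    PySem.Chars.join [] l = l.flatten := by
  induction l with
  | nil => rfl
  | cons p t ih => cases t <;> simp_all [PySem.Chars.join, List.intercalate]

theorem condA_eq_isEnd (s : List Char) :
    (s ≠ [] ∧ (PySem.List.pyGet? s (-1)).any pvEndCharsA.contains) ↔ pvIsEnd s = true := by
  have h : ".!?".toList = ['.', '!', '?'] := rfl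
  simp [pvIsEnd, pvEndCharsA, h]
  intro _
  congr 1
  funext c
  simp [List.contains_eq_mem]

theorem isEnd_append (acc p : List Char) (h : pvIsEnd acc = false) :
    pvIsEnd (acc ++ p) = pvIsEnd p := by
  rcases p.eq_nil_or_concat with rfl | ⟨q, c, rfl⟩
  · simpa using h
  · have h1 : (acc ++ (q ++ [c])).isEmpty = false := by simp
    have h2 : (q ++ [c]).isEmpty = false := by simp
    simp [pvIsEnd, PySem.List.pyGet?_neg_one, List.getLast?_append, h1, h2]

theorem loopA_eq_altJoin (parts : List (List Char)) :
    ∀ acc, pvIsEnd acc = false → pvShortenLoopA parts acc = acc ++ pvAltJoin parts := by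
  induction parts with
  | nil => intro acc _; simp [pvShortenLoopA, pvAltJoin]
  | cons p rest ih =>
    intro acc hacc
    have hcond := isEnd_append acc p hacc
    by_cases hp : pvIsEnd p = true
    · rw [pvShortenLoopA, if_pos ((condA_eq_isEnd (acc ++ p)).mpr (hcond.trans hp))]
      simp [pvAltJoin, List.findIdx?_cons, hp]
    · have hp' : pvIsEnd p = false := by simpa using hp
      have hne : ¬ ((acc ++ p) ≠ [] ∧ (PySem.List.pyGet? (acc ++ p) (-1)).any pvEndCharsA.contains) := by
        intro hc
        exact hp ((hcond ▸ (condA_eq_isEnd (acc ++ p)).mp hc))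
      rw [pvShortenLoopA, if_neg hne, ih (acc ++ p) (hcond.trans hp')]
      simp only [pvAltJoin, List.findIdx?_cons, hp']
      cases hfind : rest.findIdx? pvIsEnd with
      | none =>
        simp [join_nil_eq_flatten, List.append_assoc]
      | some i =>
        simp [join_nil_eq_flatten, List.append_assoc, List.take_succ_cons]

-- ===== VERDICT (by name: the statement is the Claim_ definition above) =====
theorem shorten_text_spec : Claim_equal_shorten_text := by
  intro text _
  unfold Spec_shorten_text shorten_text shorten_text_alt
  rw [loopA_eq_altJoin _ [] rfl]
  simp only [List.nil_append, pvAltJoin]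
  cases h : (PySem.Chars.splitOn text.toList ['\n']).findIdx? pvIsEnd <;> simp
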